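-- pv_equiv track=rewrite | github.com/henper/crafts | adventOfCode2024/4/jumble.py | count_xmases
-- ===== SOURCE A (Python) =====
-- def rotate(matrix):
--
--     # create a 7x7 grid, each with a _unique_ element (and not just 7x7 references to the same period)
--     rotated = [['.','.','.','.','.','.','.'],
--                ['.','.','.','.','.','.','.'],
--                ['.','.','.','.','.','.','.'],
--                ['.','.','.','.','.','.','.'],
--                ['.','.','.','.','.','.','.'],
--                ['.','.','.','.','.','.','.'],
--                ['.','.','.','.','.','.','.'],]
--
--     '''
--             0 1 2 3 4 5 6
--           0 S---->S---->S
--           1 ^ A-->A-->A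
--           2 | ^ M M M
--           3 S A M X M A S
--           4 ^ ^ M M M
--           5 | A   A   A
--           6 S     S     S
--     '''
--     # creamy center
--     rotated[3][3] = matrix[3][3]
--
--     # left up diagonal to upwards
--     rotated[0][3] = matrix[0][0]
--     rotated[1][3] = matrix[1][1]
--     rotated[2][3] = matrix[2][2]
--
--     # upwards to right up diagonal
--     rotated[0][6] = matrix[0][3]
--     rotated[1][5] = matrix[1][3]
--     rotated[2][4] = matrix[2][3]
--
--     # right up diagonal to forwards
--     rotated[3][6] = matrix[0][6]
--     rotated[3][5] = matrix[1][5]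
--     rotated[3][4] = matrix[2][4]
--
--     # forwards to down right diagonal
--     rotated[4][4] = matrix[3][4]
--     rotated[5][5] = matrix[3][5]
--     rotated[6][6] = matrix[3][6]
--
--     # down right diagonal to downwards
--     rotated[4][3] = matrix[4][4]
--     rotated[5][3] = matrix[5][5]
--     rotated[6][3] = matrix[6][6]
--
--     # downwards to left down diagonal
--     rotated[4][2] = matrix[4][3]
--     rotated[5][1] = matrix[5][3]
--     rotated[6][0] = matrix[6][3]
--
--     # left down diagonal to backwards
--     rotated[3][2] = matrix[4][2]
--     rotated[3][1] = matrix[5][1]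
--     rotated[3][0] = matrix[6][0]
--
--     # backwards to left up diagonal
--     rotated[0][0] = matrix[3][0]
--     rotated[1][1] = matrix[3][1]
--     rotated[2][2] = matrix[3][2]
--
--     return rotated
--
-- def count_xmases(matrix) -> int:
--     '''
--     Given a 7x7 matrix of a word jumble,
--     count how many times the word 'XMAS' appears starting from the center
--     '''
--     count = 0
--
--     if matrix[3][3] != 'X':
--         return 0
--
--     # Forwards
--     if matrix[3][3:] == 'XMAS':
--         count += 1
--
--     for i in range(7):
--         matrix = rotate(matrix)
--         s = ''.join(matrix[3][3:])
--         if s == 'XMAS':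
--             count += 1
--
--     return count
-- ===== SOURCE B (Python) =====
-- def count_xmases(matrix) -> int:
--     '''
--     Given a 7x7 matrix of a word jumble,
--     count how many times the word 'XMAS' appears starting from the center
--     '''
--     if matrix[3][3] != 'X':
--         return 0
--     count = 0
--     for dr, dc in ((-1, 1), (-1, 0), (-1, -1), (0, -1), (1, -1), (1, 0), (1, 1), (0, 1)):
--         if ''.join(matrix[3 + k * dr][3 + k * dc] for k in range(4)) == 'XMAS':
--             count += 1
--     return count
-- ===== Notes on version B (the rewrite author's own statement) =====
-- stated objective: simpler
-- what changed: B replaces the eight rotate-the-whole-grid passes (each building a fresh 7x7 grid) with a direct scan of the eight direction vectors from the center, joining the four cells along each ray; and B fixes A's dead east check (A compares the list matrix[3][3:] to the string 'XMAS', which is always False).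
-- intended difference: On inputs whose center cell is 'X' and whose four eastward cells (row 3, columns 3..6) concatenate to 'XMAS', A returns a count missing the east occurrence because its east check compares a list to a string and never fires; B returns A's value plus 1, the intended 8-direction count. — e.g. on count_xmases([[".", ".", ".", ".", ".", ".", "."], [".", ".", ".", ".", ".", ".", "."], [".", ".", ".", ".", ".", ".", "."], [".", "…): A returns 0, B returns 1
import Mathlib
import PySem

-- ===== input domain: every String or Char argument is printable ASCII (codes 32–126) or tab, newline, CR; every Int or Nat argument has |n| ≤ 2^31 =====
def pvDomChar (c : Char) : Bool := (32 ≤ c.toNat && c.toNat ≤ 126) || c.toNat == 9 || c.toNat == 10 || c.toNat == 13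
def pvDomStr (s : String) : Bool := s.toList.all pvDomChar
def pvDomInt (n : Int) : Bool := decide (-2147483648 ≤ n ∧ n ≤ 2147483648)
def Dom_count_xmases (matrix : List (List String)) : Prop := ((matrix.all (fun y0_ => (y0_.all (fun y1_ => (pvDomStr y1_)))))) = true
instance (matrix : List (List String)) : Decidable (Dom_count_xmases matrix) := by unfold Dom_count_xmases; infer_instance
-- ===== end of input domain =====

-- B scans the eight direction rays from the center directly instead of A's rotate-and-reread loop,
-- and B also counts the east ray, which A's dead list-vs-string check never counts (see D_ below).


-- ===== PORT A =====
-- matrix[i][j] for the literal non-negative indices both programs use; exact under Pre_ (indices in range)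
def pvCell (m : List (List String)) (i j : Nat) : String := (m.getD i []).getD j ""

-- rotate(matrix): the 25 assignments each target a DISTINCT cell of the fresh 7×7 '.' grid,
-- so the sequence of assignments is written as the resulting grid literal ('.' where never assigned)
def pvRot (m : List (List String)) : List (List String) :=
  [[pvCell m 3 0, ".", ".", pvCell m 0 0, ".", ".", pvCell m 0 3],
   [".", pvCell m 3 1, ".", pvCell m 1 1, ".", pvCell m 1 3, "."],
   [".", ".", pvCell m 3 2, pvCell m 2 2, pvCell m 2 3, ".", "."],
   [pvCell m 6 0, pvCell m 5 1, pvCell m 4 2, pvCell m 3 3, pvCell m 2 4, pvCell m 1 5, pvCell m 0 6],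
   [".", ".", pvCell m 4 3, pvCell m 4 4, pvCell m 3 4, ".", "."],
   [".", pvCell m 5 3, ".", pvCell m 5 5, ".", pvCell m 3 5, "."],
   [pvCell m 6 3, ".", ".", pvCell m 6 6, ".", ".", pvCell m 3 6]]

def count_xmases (matrix : List (List String)) : Int :=
  -- count = 0; if matrix[3][3] != 'X': return 0
  if pvCell matrix 3 3 ≠ "X" then 0
  else
    -- `if matrix[3][3:] == 'XMAS'` compares a LIST to a STRING: always False in Python, never increments
    -- for i in range(7): matrix = rotate(matrix); s = ''.join(matrix[3][3:]); if s == 'XMAS': count += 1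
    ((List.range 7).foldl
      (fun (st : List (List String) × Int) _ =>
        let m' := pvRot st.1
        let s := PySem.Str.join "" (((m'.getD 3 []).drop 3))  -- matrix[3][3:] of the 7×7 rotated grid
        (m', if s == "XMAS" then st.2 + 1 else st.2))
      (matrix, 0)).2

-- ===== PORT B =====
-- the four cells along the ray (dr,dc) from the center; for dr,dc ∈ {-1,0,1} the Python
-- indices 3+k*dr, 3+k*dc lie in [0,6], so toNat is exact here
def pvRay (m : List (List String)) (dr dc : Int) : List String :=
  (List.range 4).map (fun k => pvCell m (3 + k * dr).toNat (3 + k * dc).toNat)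

def count_xmases_alt (matrix : List (List String)) : Int :=
  if pvCell matrix 3 3 ≠ "X" then 0
  else
    [((-1 : Int), (1 : Int)), (-1, 0), (-1, -1), (0, -1), (1, -1), (1, 0), (1, 1), (0, 1)].foldl
      (fun c d => if PySem.Str.join "" (pvRay matrix d.1 d.2) == "XMAS" then c + 1 else c) 0

-- ===== PRECONDITION & SPEC =====
-- Exactly the inputs where the Python A returns (no IndexError): matrix[3][3] must exist, and when
-- it is 'X' rotate() reads cells up to columns (6,5,4,6,4,5,6) of the first seven rows.
def Pre_count_xmases (matrix : List (List String)) : Prop :=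
  3 < matrix.length ∧ 3 < (matrix.getD 3 []).length ∧
  ((matrix.getD 3 []).getD 3 "" ≠ "X" ∨
    (7 ≤ matrix.length ∧ 7 ≤ (matrix.getD 0 []).length ∧ 6 ≤ (matrix.getD 1 []).length ∧
     5 ≤ (matrix.getD 2 []).length ∧ 7 ≤ (matrix.getD 3 []).length ∧ 5 ≤ (matrix.getD 4 []).length ∧
     6 ≤ (matrix.getD 5 []).length ∧ 7 ≤ (matrix.getD 6 []).length))
instance (matrix : List (List String)) : Decidable (Pre_count_xmases matrix) := by
  unfold Pre_count_xmases; infer_instance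

def pvWitness_count_xmases : List (List String) := [[], [], [], ["a", "b", "c", "d"]]

-- On inputs whose center cell is 'X' and whose four eastward cells (row 3, columns 3..6) concatenate
-- to 'XMAS', A returns a count missing the east occurrence (its east check compares a list to a
-- string and never fires); B returns A's value plus 1, the intended 8-direction count.
def D_count_xmases (matrix : List (List String)) : Prop :=
  (matrix.getD 3 []).getD 3 "" = "X" ∧
  (matrix.getD 3 []).getD 3 "" ++ (matrix.getD 3 []).getD 4 "" ++ (matrix.getD 3 []).getD 5 "" ++
    (matrix.getD 3 []).getD 6 "" = "XMAS"
instance (matrix : List (List String)) : Decidable (D_count_xmases matrix) := by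
  unfold D_count_xmases; infer_instance

def Spec_count_xmases (matrix : List (List String)) (out : Int) : Prop :=
  ¬ D_count_xmases matrix → out = count_xmases_alt matrix
instance (matrix : List (List String)) (out : Int) : Decidable (Spec_count_xmases matrix out) := by
  unfold Spec_count_xmases; infer_instance

def pvDiffWitness_count_xmases : List (List String) :=
  [[".", ".", ".", ".", ".", ".", "."],
   [".", ".", ".", ".", ".", ".", "."],
   [".", ".", ".", ".", ".", ".", "."],
   [".", ".", ".", "X", "M", "A", "S"],
   [".", ".", ".", ".", ".", ".", "."],
   [".", ".", ".", ".", ".", ".", "."],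
   [".", ".", ".", ".", ".", ".", "."]]
def pvDiffWitnessOut_count_xmases : Int × Int := (0, 1)

-- ===== CLAIM (what is proved, stated in full; the proofs are below) =====
def Claim_unchanged_count_xmases : Prop := ∀ (matrix : List (List String)), Dom_count_xmases matrix → Pre_count_xmases matrix → Spec_count_xmases matrix (count_xmases matrix)
def Claim_changed_count_xmases : Prop := Dom_count_xmases (pvDiffWitness_count_xmases) ∧ Pre_count_xmases (pvDiffWitness_count_xmases) ∧ D_count_xmases (pvDiffWitness_count_xmases) ∧ count_xmases (pvDiffWitness_count_xmases) = pvDiffWitnessOut_count_xmases.1 ∧ count_xmases_alt (pvDiffWitness_count_xmases) = pvDiffWitnessOut_count_xmases.2 ∧ pvDiffWitnessOut_count_xmases.1 ≠ pvDiffWitnessOut_count_xmases.2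
def Claim_exact_count_xmases : Prop := ∀ (matrix : List (List String)), Dom_count_xmases matrix → Pre_count_xmases matrix → D_count_xmases matrix → count_xmases matrix ≠ count_xmases_alt matrix

-- ===== LEMMAS AND PROOFS =====

lemma pv_ex7 {α : Type} (l : List α) (h : 7 ≤ l.length) :
    ∃ a b c d e f g t, l = a :: b :: c :: d :: e :: f :: g :: t := by
  rcases l with _ | ⟨a, _ | ⟨b, _ | ⟨c, _ | ⟨d, _ | ⟨e, _ | ⟨f, _ | ⟨g, t⟩⟩⟩⟩⟩⟩⟩ <;>
    first | exact ⟨a, b, c, d, e, f, g, t, rfl⟩ | simp at h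

lemma pv_ex6 {α : Type} (l : List α) (h : 6 ≤ l.length) :
    ∃ a b c d e f t, l = a :: b :: c :: d :: e :: f :: t := by
  rcases l with _ | ⟨a, _ | ⟨b, _ | ⟨c, _ | ⟨d, _ | ⟨e, _ | ⟨f, t⟩⟩⟩⟩⟩⟩ <;>
    first | exact ⟨a, b, c, d, e, f, t, rfl⟩ | simp at h

lemma pv_ex5 {α : Type} (l : List α) (h : 5 ≤ l.length) :
    ∃ a b c d e t, l = a :: b :: c :: d :: e :: t := by
  rcases l with _ | ⟨a, _ | ⟨b, _ | ⟨c, _ | ⟨d, _ | ⟨e, t⟩⟩⟩⟩⟩ <;>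
    first | exact ⟨a, b, c, d, e, t, rfl⟩ | simp at h

lemma pv_join4 (a b c d : String) :
    PySem.Str.join "" [a, b, c, d] = a ++ b ++ c ++ d := by
  have h : (PySem.Str.join "" [a, b, c, d]).toList = (a ++ b ++ c ++ d).toList := by
    simp [PySem.Chars.join, List.intercalate]
  exact String.toList_inj.mp h

-- the single matrix-shape computation both verdicts need: on any grid of the admitted shape whose
-- center is 'X', A and B agree exactly when the east ray does not spell 'XMAS', and differ when it does
set_option maxHeartbeats 4000000 in
lemma pv_main (m : List (List String))
    (hsh : 7 ≤ m.length ∧ 7 ≤ (m.getD 0 []).length ∧ 6 ≤ (m.getD 1 []).length ∧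
      5 ≤ (m.getD 2 []).length ∧ 7 ≤ (m.getD 3 []).length ∧ 5 ≤ (m.getD 4 []).length ∧
      6 ≤ (m.getD 5 []).length ∧ 7 ≤ (m.getD 6 []).length)
    (hc : (m.getD 3 []).getD 3 "" = "X") :
    (¬ (m.getD 3 []).getD 3 "" ++ (m.getD 3 []).getD 4 "" ++ (m.getD 3 []).getD 5 "" ++
        (m.getD 3 []).getD 6 "" = "XMAS" → count_xmases m = count_xmases_alt m) ∧
    ((m.getD 3 []).getD 3 "" ++ (m.getD 3 []).getD 4 "" ++ (m.getD 3 []).getD 5 "" ++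
        (m.getD 3 []).getD 6 "" = "XMAS" → count_xmases m ≠ count_xmases_alt m) := by
  obtain ⟨hl, l0, l1, l2, l3, l4, l5, l6⟩ := hsh
  obtain ⟨r0, r1, r2, r3, r4, r5, r6, t, rfl⟩ := pv_ex7 m hl
  simp only [List.getD_cons_zero, List.getD_cons_succ] at l0 l1 l2 l3 l4 l5 l6 hc ⊢
  obtain ⟨a00, a01, a02, a03, a04, a05, a06, t0, rfl⟩ := pv_ex7 r0 l0
  obtain ⟨a10, a11, a12, a13, a14, a15, t1, rfl⟩ := pv_ex6 r1 l1
  obtain ⟨a20, a21, a22, a23, a24, t2, rfl⟩ := pv_ex5 r2 l2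
  obtain ⟨a30, a31, a32, a33, a34, a35, a36, t3, rfl⟩ := pv_ex7 r3 l3
  obtain ⟨a40, a41, a42, a43, a44, t4, rfl⟩ := pv_ex5 r4 l4
  obtain ⟨a50, a51, a52, a53, a54, a55, t5, rfl⟩ := pv_ex6 r5 l5
  obtain ⟨a60, a61, a62, a63, a64, a65, a66, t6, rfl⟩ := pv_ex7 r6 l6
  simp only [List.getD_cons_zero, List.getD_cons_succ] at hc ⊢
  subst hc
  constructor
  · intro hE
    simp [count_xmases, count_xmases_alt, pvRot, pvRay, pvCell, List.range_succ, pv_join4, hE]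
  · intro hE
    simp [count_xmases, count_xmases_alt, pvRot, pvRay, pvCell, List.range_succ, pv_join4, hE]

-- ===== VERDICT (by name: the statement is the Claim_ definition above) =====
set_option maxHeartbeats 1000000 in
theorem count_xmases_spec : Claim_unchanged_count_xmases := by
  intro m hdom hpre
  unfold Spec_count_xmases
  intro hnd
  obtain ⟨h3, h33, hcase⟩ := hpre
  by_cases hc : (m.getD 3 []).getD 3 "" = "X"
  · rcases hcase with hne | hsh
    · exact absurd hc hne
    have hE : ¬ (m.getD 3 []).getD 3 "" ++ (m.getD 3 []).getD 4 "" ++ (m.getD 3 []).getD 5 "" ++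
        (m.getD 3 []).getD 6 "" = "XMAS" := fun h => hnd ⟨hc, h⟩
    exact (pv_main m hsh hc).1 hE
  · have h1 : count_xmases m = 0 := by
      unfold count_xmases; rw [if_pos (show pvCell m 3 3 ≠ "X" from hc)]
    have h2 : count_xmases_alt m = 0 := by
      unfold count_xmases_alt; rw [if_pos (show pvCell m 3 3 ≠ "X" from hc)]
    rw [h1, h2]

theorem count_xmases_changed : Claim_changed_count_xmases := by
  unfold Claim_changed_count_xmases; decide

theorem count_xmases_tight : Claim_exact_count_xmases := by
  intro m hdom hpre hd
  obtain ⟨h3, h33, hcase⟩ := hpre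
  obtain ⟨hc, hE⟩ := hd
  rcases hcase with hne | hsh
  · exact absurd hc hne
  exact (pv_main m hsh hc).2 hE
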